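-- pv_equiv track=rewrite | github.com/janaMXCX/Data-structures-and-algorithms | 考试题目/test1.py | find_base
-- ===== SOURCE A (Python) =====
-- def b2ten(num, base):
--     ret = 0
--     cnt = 0
--     digit = []
--
--     while num != 0:
--         digit.append(num % 10)
--         num = num // 10
--
--     cnt = len(digit) - 1
--
--     while cnt >= 0:
--         if digit[cnt] >= base:
--             return -1  # 数字超过B进制的数码范围
--         ret = ret * base + digit[cnt]
--         cnt -= 1
--
--     return ret
--
-- def find_base(p, q, r):
--     for b in range(2, 17):
--         pb = b2ten(p, b)
--         qb = b2ten(q, b)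
--         rb = b2ten(r, b)
--
--         if pb == -1 or qb == -1 or rb == -1:
--             continue
--
--         if pb * qb == rb:
--             return b
--
--     return 0
-- ===== SOURCE B (Python) =====
-- def _digits(n):
--     # decimal digits, least-significant first
--     if n == 0:
--         return []
--     return [n % 10] + _digits(n // 10)
--
-- def _addp(xs, ys):
--     # pointwise sum of coefficient lists (shorter one padded with zeros)
--     if not xs:
--         return ys
--     if not ys:
--         return xs
--     return [xs[0] + ys[0]] + _addp(xs[1:], ys[1:])
--
-- def _conv(xs, ys):
--     # polynomial product (convolution) of coefficient lists
--     if not xs: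
--         return []
--     return _addp([xs[0] * c for c in ys], [0] + _conv(xs[1:], ys))
--
-- def _evalp(ds, b):
--     # value of the coefficient list at b
--     if not ds:
--         return 0
--     return ds[0] + b * _evalp(ds[1:], b)
--
-- def find_base(p, q, r):
--     dp, dq, dr = _digits(p), _digits(q), _digits(r)
--     mx = max(dp + dq + dr, default=-1)
--     # s is the polynomial P*Q - R; base b is a solution iff all digits < b and s(b) == 0
--     s = _addp(_conv(dp, dq), [-d for d in dr])
--     return next((b for b in range(2, 17) if mx < b and _evalp(s, b) == 0), 0)
-- ===== Notes on version B (the rewrite author's own statement) =====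
-- stated objective: alternative
-- what changed: B does symbolic polynomial arithmetic once - it convolves p's and q's digit lists into the product polynomial and subtracts r's digits - so each candidate base needs only a max-digit test and one evaluation of that single difference polynomial for zero, instead of A's per-base digit re-extraction and three Horner evaluations with a -1 sentinel.
import Mathlib
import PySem

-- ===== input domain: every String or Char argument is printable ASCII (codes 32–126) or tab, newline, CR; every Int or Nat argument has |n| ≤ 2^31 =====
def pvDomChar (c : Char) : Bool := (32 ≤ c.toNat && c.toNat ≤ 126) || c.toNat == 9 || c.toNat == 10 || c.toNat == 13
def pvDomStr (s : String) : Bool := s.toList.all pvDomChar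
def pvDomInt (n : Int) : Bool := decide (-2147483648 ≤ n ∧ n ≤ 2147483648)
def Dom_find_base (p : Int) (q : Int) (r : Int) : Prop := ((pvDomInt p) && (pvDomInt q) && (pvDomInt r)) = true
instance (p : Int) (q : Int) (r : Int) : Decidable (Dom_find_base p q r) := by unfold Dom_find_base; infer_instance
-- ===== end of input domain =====

-- B replaces A's per-base three-way Horner evaluation by symbolic polynomial arithmetic:
-- it convolves the digit lists of p and q once, subtracts r's digits, and per base only
-- tests whether that single difference polynomial vanishes (alternative decomposition).
-- Python A diverges on negative arguments (its digit loop never reaches 0), so Pre_ requires 0 ≤ p, q, r.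

-- ===== PORT A =====
-- the 'while num != 0' digit loop; exact for num ≥ 0 (Python diverges for num < 0, excluded by Pre_)
def b2tenDigits (num : Int) : List Int :=
  if h : 0 < num then PySem.Int.mod num 10 :: b2tenDigits (PySem.Int.floordiv num 10) else []
termination_by num.toNat
decreasing_by
  have h10 : PySem.Int.floordiv num 10 = num / 10 :=
    PySem.Int.floordiv_eq_ediv_of_pos (by omega)
  rw [h10]; omega

-- the 'while cnt >= 0' loop of b2ten, reading digit[cnt] from the top index down
def b2tenLoop (ds : List Int) (base : Int) (ret : Int) : Int :=
  match ds with
  | [] => ret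
  | d :: t => if d ≥ base then -1 else b2tenLoop t base (ret * base + d)

def b2ten (num : Int) (base : Int) : Int :=
  b2tenLoop (b2tenDigits num).reverse base 0

def find_base_go (bs : List Int) (p : Int) (q : Int) (r : Int) : Int :=
  match bs with
  | [] => 0
  | b :: t =>
    let pb := b2ten p b
    let qb := b2ten q b
    let rb := b2ten r b
    if pb = -1 ∨ qb = -1 ∨ rb = -1 then find_base_go t p q r
    else if pb * qb = rb then b else find_base_go t p q r

def find_base (p : Int) (q : Int) (r : Int) : Int :=
  find_base_go (PySem.List.pyRange 2 17 1) p q r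

-- ===== PORT B =====
-- _digits: decimal digits, least-significant first (Python diverges for n < 0, excluded by Pre_)
def pvDigits (n : Int) : List Int :=
  if h : 0 < n then PySem.Int.mod n 10 :: pvDigits (PySem.Int.floordiv n 10) else []
termination_by n.toNat
decreasing_by
  have h10 : PySem.Int.floordiv n 10 = n / 10 :=
    PySem.Int.floordiv_eq_ediv_of_pos (by omega)
  rw [h10]; omega

-- _addp: pointwise sum of coefficient lists (shorter one padded with zeros)
def pvAddp : List Int → List Int → List Int
  | [], ys => ys
  | x :: xs, [] => x :: xs
  | x :: xs, y :: ys => (x + y) :: pvAddp xs ys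

-- _conv: polynomial product (convolution) of coefficient lists
def pvConv : List Int → List Int → List Int
  | [], _ => []
  | x :: xs, ys => pvAddp (ys.map (fun c => x * c)) (0 :: pvConv xs ys)

-- _evalp: value of the coefficient list at b
def pvEvalP (ds : List Int) (b : Int) : Int :=
  match ds with
  | [] => 0
  | d :: t => d + b * pvEvalP t b

-- max(·, default=-1)
def pvMax (ds : List Int) : Int := ds.foldl max (-1)

-- the next(... for b in range(2,17) if ..., 0) search
def pvFirstBase (bs : List Int) (mx : Int) (s : List Int) : Int :=
  match bs with
  | [] => 0
  | b :: t => if mx < b ∧ pvEvalP s b = 0 then b else pvFirstBase t mx s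

def find_base_alt (p : Int) (q : Int) (r : Int) : Int :=
  let dp := pvDigits p
  let dq := pvDigits q
  let dr := pvDigits r
  let mx := pvMax ((dp ++ dq) ++ dr)
  let s := pvAddp (pvConv dp dq) (dr.map (fun d => -d))
  pvFirstBase (PySem.List.pyRange 2 17 1) mx s

-- ===== PRECONDITION & SPEC =====
-- Python A never returns on a negative argument (its digit loop diverges), so Pre_ keeps the nonnegative inputs.
def Pre_find_base (p : Int) (q : Int) (r : Int) : Prop := 0 ≤ p ∧ 0 ≤ q ∧ 0 ≤ r
instance (p : Int) (q : Int) (r : Int) : Decidable (Pre_find_base p q r) := by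
  unfold Pre_find_base; infer_instance

def pvWitness_find_base : Int × Int × Int := (6, 9, 42)

def Spec_find_base (p : Int) (q : Int) (r : Int) (out : Int) : Prop := out = find_base_alt p q r
instance (p : Int) (q : Int) (r : Int) (out : Int) : Decidable (Spec_find_base p q r out) := by
  unfold Spec_find_base; infer_instance

-- ===== CLAIM (what is proved, stated in full; the proofs are below) =====
def Claim_equal_find_base : Prop :=
  ∀ (p : Int) (q : Int) (r : Int), Dom_find_base p q r → Pre_find_base p q r →
    Spec_find_base p q r (find_base p q r)

-- ===== LEMMAS AND PROOFS =====

lemma pvDigits_eq_b2tenDigits (n : Int) : pvDigits n = b2tenDigits n := by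
  fun_induction pvDigits n with
  | case1 n h ih => rw [b2tenDigits, dif_pos h, ih]
  | case2 n h => rw [b2tenDigits, dif_neg h]

lemma b2tenDigits_mem (n d : Int) (hd : d ∈ b2tenDigits n) : 0 ≤ d ∧ d < 10 := by
  fun_induction b2tenDigits n with
  | case1 n h ih =>
    rcases List.mem_cons.mp hd with h1 | h2
    · subst h1
      exact ⟨PySem.Int.mod_nonneg n (by omega), PySem.Int.mod_lt n (by omega)⟩
    · exact ih h2
  | case2 n h => simp at hd

-- the Horner fold over the reversed (msf) digit list equals B's recursive lsf evaluation
lemma horner_rev_eval (ds : List Int) (b : Int) :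
    ds.reverse.foldl (fun v d => v * b + d) 0 = pvEvalP ds b := by
  induction ds with
  | nil => simp [pvEvalP]
  | cons d t ih =>
    rw [pvEvalP, ← ih, List.reverse_cons, List.foldl_append]
    simp only [List.foldl_cons, List.foldl_nil]
    ring

lemma b2tenLoop_spec (ds : List Int) (b acc : Int) :
    b2tenLoop ds b acc =
      if ds.any (fun d => b ≤ d) then -1 else ds.foldl (fun v d => v * b + d) acc := by
  induction ds generalizing acc with
  | nil => simp [b2tenLoop]
  | cons d t ih =>
    simp only [b2tenLoop, List.any_cons, List.foldl_cons]
    by_cases hd : d ≥ b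
    · simp [hd]
    · rw [if_neg hd, ih]
      simp [show ¬ (b ≤ d) from hd]

-- A's per-base result through B's digit list
lemma b2ten_char (n b : Int) :
    b2ten n b = if (b2tenDigits n).any (fun d => b ≤ d) then -1
                else pvEvalP (b2tenDigits n) b := by
  rw [b2ten, b2tenLoop_spec, List.any_reverse, horner_rev_eval]

lemma pvEvalP_nonneg (ds : List Int) (b : Int) (hb : 0 ≤ b) (hds : ∀ d ∈ ds, 0 ≤ d) :
    0 ≤ pvEvalP ds b := by
  induction ds with
  | nil => simp [pvEvalP]
  | cons d t ih =>
    have h1 := hds d (by simp)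
    have h2 := ih (fun x hx => hds x (List.mem_cons_of_mem _ hx))
    have := mul_nonneg hb h2
    simp only [pvEvalP]; omega

lemma pvEvalP_addp (xs ys : List Int) (b : Int) :
    pvEvalP (pvAddp xs ys) b = pvEvalP xs b + pvEvalP ys b := by
  induction xs generalizing ys with
  | nil => simp [pvAddp, pvEvalP]
  | cons x xs ih =>
    cases ys with
    | nil => simp [pvAddp, pvEvalP]
    | cons y ys => simp only [pvAddp, pvEvalP, ih]; ring

lemma pvEvalP_map_mul (a : Int) (ys : List Int) (b : Int) :
    pvEvalP (ys.map (fun c => a * c)) b = a * pvEvalP ys b := by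
  induction ys with
  | nil => simp [pvEvalP]
  | cons y ys ih => simp only [List.map_cons, pvEvalP, ih]; ring

lemma pvEvalP_map_neg (ys : List Int) (b : Int) :
    pvEvalP (ys.map (fun d => -d)) b = - pvEvalP ys b := by
  induction ys with
  | nil => simp [pvEvalP]
  | cons y ys ih => simp only [List.map_cons, pvEvalP, ih]; ring

-- the convolution is the polynomial product
lemma pvEvalP_conv (xs ys : List Int) (b : Int) :
    pvEvalP (pvConv xs ys) b = pvEvalP xs b * pvEvalP ys b := by
  induction xs with
  | nil => simp [pvConv, pvEvalP]
  | cons x xs ih =>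
    simp only [pvConv, pvEvalP, pvEvalP_addp, pvEvalP_map_mul, ih]
    ring

lemma le_foldl_max (l : List Int) (a b : Int) :
    b ≤ l.foldl max a ↔ b ≤ a ∨ ∃ x ∈ l, b ≤ x := by
  induction l generalizing a with
  | nil => simp
  | cons x t ih =>
    rw [List.foldl_cons, ih]
    simp only [List.mem_cons, le_max_iff]
    constructor
    · rintro ((h | h) | ⟨y, hy, hby⟩)
      · exact Or.inl h
      · exact Or.inr ⟨x, Or.inl rfl, h⟩
      · exact Or.inr ⟨y, Or.inr hy, hby⟩
    · rintro (h | ⟨y, hy | hy, hby⟩)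
      · exact Or.inl (Or.inl h)
      · subst hy; exact Or.inl (Or.inr hby)
      · exact Or.inr ⟨y, hy, hby⟩

-- per-base validity: some digit ≥ b iff the global max ≥ b (for b ≥ 2)
lemma valid_iff (p q r b : Int) (hb : 2 ≤ b) :
    (¬ pvMax ((b2tenDigits p ++ b2tenDigits q) ++ b2tenDigits r) < b) ↔
      ((b2tenDigits p).any (fun d => b ≤ d) ∨ (b2tenDigits q).any (fun d => b ≤ d) ∨
       (b2tenDigits r).any (fun d => b ≤ d)) := by
  rw [not_lt, pvMax, le_foldl_max]
  simp only [List.any_eq_true, decide_eq_true_eq, List.mem_append]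
  constructor
  · rintro (h | ⟨x, (hx | hx) | hx, hbx⟩)
    · omega
    · exact Or.inl ⟨x, hx, hbx⟩
    · exact Or.inr (Or.inl ⟨x, hx, hbx⟩)
    · exact Or.inr (Or.inr ⟨x, hx, hbx⟩)
  · rintro (⟨x, hx, hbx⟩ | ⟨x, hx, hbx⟩ | ⟨x, hx, hbx⟩)
    · exact Or.inr ⟨x, Or.inl (Or.inl hx), hbx⟩
    · exact Or.inr ⟨x, Or.inl (Or.inr hx), hbx⟩
    · exact Or.inr ⟨x, Or.inr hx, hbx⟩

lemma go_eq (bs : List Int) (p q r : Int) (hbs : ∀ b ∈ bs, 2 ≤ b) :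
    find_base_go bs p q r =
      pvFirstBase bs (pvMax ((b2tenDigits p ++ b2tenDigits q) ++ b2tenDigits r))
        (pvAddp (pvConv (b2tenDigits p) (b2tenDigits q))
          ((b2tenDigits r).map (fun d => -d))) := by
  induction bs with
  | nil => rfl
  | cons b t ih =>
    have hb : 2 ≤ b := hbs b (by simp)
    have ih' := ih (fun x hx => hbs x (List.mem_cons_of_mem _ hx))
    simp only [find_base_go, pvFirstBase]
    set mx := pvMax ((b2tenDigits p ++ b2tenDigits q) ++ b2tenDigits r) with hmx
    by_cases hv : mx < b
    · -- all digits valid: no -1, values are the evaluations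
      have hval := (not_iff_not.mpr (valid_iff p q r b hb)).mp (by rw [← hmx]; omega)
      have hp' : ¬ (b2tenDigits p).any (fun d => b ≤ d) = true := fun h => hval (Or.inl h)
      have hq' : ¬ (b2tenDigits q).any (fun d => b ≤ d) = true := fun h => hval (Or.inr (Or.inl h))
      have hr' : ¬ (b2tenDigits r).any (fun d => b ≤ d) = true := fun h => hval (Or.inr (Or.inr h))
      have hpv : b2ten p b = pvEvalP (b2tenDigits p) b := by rw [b2ten_char, if_neg hp']
      have hqv : b2ten q b = pvEvalP (b2tenDigits q) b := by rw [b2ten_char, if_neg hq']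
      have hrv : b2ten r b = pvEvalP (b2tenDigits r) b := by rw [b2ten_char, if_neg hr']
      have hnn : ∀ n : Int, 0 ≤ pvEvalP (b2tenDigits n) b :=
        fun n => pvEvalP_nonneg _ _ (by omega) (fun d hd => (b2tenDigits_mem n d hd).1)
      have hno : ¬ (b2ten p b = -1 ∨ b2ten q b = -1 ∨ b2ten r b = -1) := by
        rw [hpv, hqv, hrv]
        have := hnn p; have := hnn q; have := hnn r
        omega
      rw [if_neg hno, hpv, hqv, hrv]
      have hs : pvEvalP (pvAddp (pvConv (b2tenDigits p) (b2tenDigits q))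
          ((b2tenDigits r).map (fun d => -d))) b =
          pvEvalP (b2tenDigits p) b * pvEvalP (b2tenDigits q) b -
            pvEvalP (b2tenDigits r) b := by
        rw [pvEvalP_addp, pvEvalP_conv, pvEvalP_map_neg]; ring
      by_cases he : pvEvalP (b2tenDigits p) b * pvEvalP (b2tenDigits q) b =
          pvEvalP (b2tenDigits r) b
      · rw [if_pos he, if_pos ⟨hv, by omega⟩]
      · rw [if_neg he, if_neg (by rintro ⟨_, h0⟩; rw [hs] at h0; omega), ih']
    · -- some digit out of range: A sees a -1, B's mx-test fails
      have hval := (valid_iff p q r b hb).mp (by rw [← hmx]; exact hv)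
      have hA : b2ten p b = -1 ∨ b2ten q b = -1 ∨ b2ten r b = -1 := by
        rcases hval with h | h | h
        · exact Or.inl (by rw [b2ten_char, if_pos h])
        · exact Or.inr (Or.inl (by rw [b2ten_char, if_pos h]))
        · exact Or.inr (Or.inr (by rw [b2ten_char, if_pos h]))
      rw [if_pos hA, if_neg (by rintro ⟨h, _⟩; exact hv h), ih']

-- ===== VERDICT (by name: the statement is the Claim_ definition above) =====
theorem find_base_spec : Claim_equal_find_base := by
  intro p q r _hdom _hpre
  unfold Spec_find_base find_base find_base_alt
  simp only [pvDigits_eq_b2tenDigits]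
  exact go_eq _ p q r (by decide)
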